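-- pv_equiv track=rewrite | github.com/SandaRuFdo/podpipeline | app.py | _parse_pipeline
-- ===== SOURCE A (Python) =====
-- PHASE_ORDER = ["setup","research","script","audio","youtube_meta","transcribe","visuals","deliverables","cinematic_setup"]
--
-- def _parse_pipeline(raw_text):
--     phases = []
--     for phase in PHASE_ORDER:
--         status = "pending"
--         for line in raw_text.splitlines():
--             if phase in line:
--                 for s in ("done","running","failed","skipped"):
--                     if s in line: status = s; break
--                 break
--         phases.append({"phase": phase, "status": status})
--     return phases
-- ===== SOURCE B (Python) =====
-- PHASE_ORDER = ["setup","research","script","audio","youtube_meta","transcribe","visuals","deliverables","cinematic_setup"]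
--
-- def _parse_pipeline(raw_text):
--     lines = raw_text.splitlines()
--     found = {}
--     for line in lines:
--         for phase in PHASE_ORDER:
--             if phase not in found and phase in line:
--                 status = "pending"
--                 for s in ("done","running","failed","skipped"):
--                     if s in line:
--                         status = s
--                         break
--                 found[phase] = status
--     return [{"phase": p, "status": found.get(p, "pending")} for p in PHASE_ORDER]
-- ===== Notes on version B (the rewrite author's own statement) =====
-- stated objective: alternative
-- what changed: B splits the text once and makes a single pass over the lines, recording each phase's status in a dict on its first matching line, instead of A's per-phase rescan of all lines (A re-splits and rescans the text for every phase).
import Mathlib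
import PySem

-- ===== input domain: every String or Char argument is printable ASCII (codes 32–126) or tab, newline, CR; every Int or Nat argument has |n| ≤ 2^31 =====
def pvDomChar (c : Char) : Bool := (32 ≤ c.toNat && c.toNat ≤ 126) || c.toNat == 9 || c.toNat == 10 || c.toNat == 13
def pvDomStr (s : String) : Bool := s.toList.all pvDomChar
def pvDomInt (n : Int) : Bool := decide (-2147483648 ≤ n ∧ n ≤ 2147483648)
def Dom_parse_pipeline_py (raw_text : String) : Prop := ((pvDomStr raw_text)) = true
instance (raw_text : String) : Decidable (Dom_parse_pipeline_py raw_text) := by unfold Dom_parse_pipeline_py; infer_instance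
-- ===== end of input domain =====

-- B splits the text once and makes a single pass over the lines with a phase→status dict,
-- instead of A's per-phase rescan of all lines; same return value (alternative decomposition).

-- ===== PORT A =====
def PHASE_ORDER : List String :=
  ["setup","research","script","audio","youtube_meta","transcribe","visuals","deliverables","cinematic_setup"]

def STATUSES : List String := ["done","running","failed","skipped"]

-- A's inner status loop: 'for s in (...): if s in line: status = s; break' starting from "pending"
def aStatusScan (line : String) : List String → String
  | [] => "pending"
  | s :: rest => if PySem.Str.isIn s line then s else aStatusScan line rest

-- A's middle loop: 'for line in raw_text.splitlines(): if phase in line: ...; break'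
def aLineLoop (phase : String) : List String → String
  | [] => "pending"
  | l :: rest => if PySem.Str.isIn phase l then aStatusScan l STATUSES else aLineLoop phase rest

def parse_pipeline_py (raw_text : String) : List (List (String × String)) :=
  PHASE_ORDER.foldl
    (fun phases phase =>
      phases ++ [[("phase", phase), ("status", aLineLoop phase (PySem.Str.splitlines raw_text))]]) []

-- ===== PORT B =====
-- B's status computation for one line (same triple loop as in Source B)
def bLineStatus (line : String) : List String → String
  | [] => "pending"
  | s :: rest => if PySem.Str.isIn s line then s else bLineStatus line rest

-- B's inner 'for phase in PHASE_ORDER' body applied over one line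
def bStep (d : PySem.Dict String String) (line : String) : PySem.Dict String String :=
  PHASE_ORDER.foldl
    (fun d phase =>
      if !(d.contains phase) && PySem.Str.isIn phase line then
        d.insert phase (bLineStatus line STATUSES)
      else d) d

def parse_pipeline_py_alt (raw_text : String) : List (List (String × String)) :=
  let lines := PySem.Str.splitlines raw_text
  let found := lines.foldl bStep PySem.Dict.empty
  PHASE_ORDER.map (fun p => [("phase", p), ("status", found.getD p "pending")])

-- ===== PRECONDITION & SPEC =====
def Spec_parse_pipeline_py (raw_text : String) (out : List (List (String × String))) : Prop := out = parse_pipeline_py_alt raw_text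
instance (raw_text : String) (out : List (List (String × String))) : Decidable (Spec_parse_pipeline_py raw_text out) := by unfold Spec_parse_pipeline_py; infer_instance

-- ===== CLAIM (what is proved, stated in full; the proofs are below) =====
def Claim_equal_parse_pipeline_py : Prop := ∀ (raw_text : String), Dom_parse_pipeline_py raw_text → Spec_parse_pipeline_py raw_text (parse_pipeline_py raw_text)

-- ===== LEMMAS AND PROOFS =====

-- first line (if any) containing `phase`, mapped to its status
def firstMatch (phase : String) : List String → Option String
  | [] => none
  | l :: rest => if PySem.Str.isIn phase l then some (bLineStatus l STATUSES) else firstMatch phase rest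

theorem aStatusScan_eq_bLineStatus (line : String) (ss : List String) :
    aStatusScan line ss = bLineStatus line ss := by
  induction ss with
  | nil => rfl
  | cons s rest ih => simp [aStatusScan, bLineStatus, ih]

theorem aLineLoop_eq_firstMatch (phase : String) (lines : List String) :
    aLineLoop phase lines = (firstMatch phase lines).getD "pending" := by
  induction lines with
  | nil => rfl
  | cons l rest ih =>
    simp only [aLineLoop, firstMatch]
    split <;> simp [ih, aStatusScan_eq_bLineStatus]

-- effect of the inner fold over a phase list on one lookup
theorem get?_inner_fold (ps : List String) (d : PySem.Dict String String) (l q : String) :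
    (ps.foldl
      (fun d phase =>
        if !(d.contains phase) && PySem.Str.isIn phase l then
          d.insert phase (bLineStatus l STATUSES)
        else d) d).get? q =
      if q ∈ ps ∧ d.get? q = none ∧ PySem.Str.isIn q l = true then
        some (bLineStatus l STATUSES)
      else d.get? q := by
  induction ps generalizing d with
  | nil => simp
  | cons p ps ih =>
    simp only [List.foldl_cons]
    rw [ih]
    by_cases hb : (!(d.contains p) && PySem.Str.isIn p l) = true
    · simp only [if_pos hb, PySem.Dict.get?_insert]
      have hcp : d.contains p = false := by
        rcases Bool.and_eq_true .. |>.mp hb with ⟨h1, _⟩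
        simpa using h1
      have hil : PySem.Str.isIn p l = true := (Bool.and_eq_true .. |>.mp hb).2
      have hgp : d.get? p = none := (PySem.Dict.get?_eq_none_iff_contains d p).mpr hcp
      by_cases hq : q = p
      · subst hq
        have hil' : PySem.Chars.isIn q.toList l.toList = true := by simpa using hil
        simp [hgp, hil']
      · simp [hq]
    · simp only [if_neg hb]
      by_cases hq : q = p
      · subst hq
        have hnot : ¬ (d.get? q = none ∧ PySem.Str.isIn q l = true) := by
          intro ⟨h1, h2⟩
          apply hb
          have h3 := (PySem.Dict.get?_eq_none_iff_contains d q).mp h1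
          have h2' : PySem.Chars.isIn q.toList l.toList = true := by simpa using h2
          simp [h3, h2']
        rw [if_neg (by tauto), if_neg (by simp only [List.mem_cons]; tauto)]
      · simp [hq]

theorem get?_foldl_bStep (lines : List String) (d : PySem.Dict String String) (q : String) :
    (lines.foldl bStep d).get? q =
      ((d.get? q).or (if q ∈ PHASE_ORDER then firstMatch q lines else none)) := by
  induction lines generalizing d with
  | nil => cases hg : d.get? q <;> simp [firstMatch, hg]
  | cons l rest ih =>
    simp only [List.foldl_cons, ih, bStep]
    rw [get?_inner_fold]
    by_cases hq : q ∈ PHASE_ORDER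
    · cases hg : d.get? q with
      | some s => simp [hq]
      | none =>
        by_cases hin : PySem.Chars.isIn q.toList l.toList = true
        · simp [hq, hin, firstMatch]
        · simp [hq, hin, firstMatch]
    · simp [hq]

theorem per_phase (raw_text : String) (p : String) (hp : p ∈ PHASE_ORDER) :
    aLineLoop p (PySem.Str.splitlines raw_text) =
      ((PySem.Str.splitlines raw_text).foldl bStep PySem.Dict.empty).getD p "pending" := by
  rw [PySem.Dict.getD_eq_get?_getD, get?_foldl_bStep, aLineLoop_eq_firstMatch]
  simp [hp]

-- ===== VERDICT (by name: the statement is the Claim_ definition above) =====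
theorem parse_pipeline_py_spec : Claim_equal_parse_pipeline_py := by
  intro raw_text _
  show parse_pipeline_py raw_text = parse_pipeline_py_alt raw_text
  unfold parse_pipeline_py parse_pipeline_py_alt
  simp only [PHASE_ORDER, List.foldl_cons, List.foldl_nil, List.map_cons, List.map_nil,
    List.nil_append, List.cons_append]
  simp only [per_phase raw_text _ (by decide : "setup" ∈ PHASE_ORDER),
    per_phase raw_text _ (by decide : "research" ∈ PHASE_ORDER),
    per_phase raw_text _ (by decide : "script" ∈ PHASE_ORDER),
    per_phase raw_text _ (by decide : "audio" ∈ PHASE_ORDER),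
    per_phase raw_text _ (by decide : "youtube_meta" ∈ PHASE_ORDER),
    per_phase raw_text _ (by decide : "transcribe" ∈ PHASE_ORDER),
    per_phase raw_text _ (by decide : "visuals" ∈ PHASE_ORDER),
    per_phase raw_text _ (by decide : "deliverables" ∈ PHASE_ORDER),
    per_phase raw_text _ (by decide : "cinematic_setup" ∈ PHASE_ORDER)]
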